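-- pv_equiv track=rewrite | github.com/LoanpyDataHub/loanpy | loanpy/scapplier.py | substitute_operations
-- ===== SOURCE A (Python) =====
-- from typing import Dict, Iterable, List, Tuple, Union
--
-- def substitute_operations(operations: List[str]) -> List[str]:
--     """
--     Replaces subsequent "delete, insert" / "insert, delete" operations with
--     "substitute". Called by loanpy.apply.tuples2editops.
--
--     :param operations: A list of human readable edit operations
--     :type operations: List of strings, e.g. ['insert l', 'delete h', 'keep ó']
--
--     :returns: Updated operations
--     :rtype: List of strings, e.g. ['substitute l by h', 'keep ó']
--
--     .. code-block:: python
--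
--         >>> from loanpy.scapplier import substitute_operations
--         >>> substitute_operations(['insert A', 'delete B', 'insert C'])
--         ['substitute B by A', 'insert C']
--         >>> substitute_operations(['delete A', 'insert B', 'delete C', 'insert D'])
--         ['substitute A by B', 'substitute C by D']
--
--     """
--
--     i = 0
--     while i < len(operations) - 1:
--         if (operations[i].startswith('delete ') and
--                 operations[i+1].startswith('insert ')):
--             x = operations[i][7:]
--             y = operations[i+1][7:]
--             operations[i:i+2] = [f'substitute {x} by {y}']
--         elif (operations[i].startswith('insert ') and
--                 operations[i+1].startswith('delete ')):
--             x = operations[i][7:]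
--             y = operations[i+1][7:]
--             operations[i:i+2] = [f'substitute {y} by {x}']
--         else:
--             i += 1
--     return operations
-- ===== SOURCE B (Python) =====
-- def substitute_operations(operations):
--     # One forward pass with the output used as a stack: merge the current op
--     # with the last kept op (look-behind) instead of A's look-ahead + splicing.
--     result = []
--     for op in operations:
--         if result and result[-1].startswith('delete ') and op.startswith('insert '):
--             prev = result.pop()
--             result.append(f'substitute {prev[7:]} by {op[7:]}')
--         elif result and result[-1].startswith('insert ') and op.startswith('delete '):
--             prev = result.pop()
--             result.append(f'substitute {op[7:]} by {prev[7:]}')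
--         else:
--             result.append(op)
--     operations[:] = result  # preserve A's in-place update and returned identity
--     return operations
-- ===== Notes on version B (the rewrite author's own statement) =====
-- stated objective: simpler
-- what changed: Replaces A's index-driven while loop with in-place list splicing (re-testing the same index after each merge) by a single stack-based fold that merges each op with the last kept op via look-behind, then writes the result back in place.
import Mathlib
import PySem

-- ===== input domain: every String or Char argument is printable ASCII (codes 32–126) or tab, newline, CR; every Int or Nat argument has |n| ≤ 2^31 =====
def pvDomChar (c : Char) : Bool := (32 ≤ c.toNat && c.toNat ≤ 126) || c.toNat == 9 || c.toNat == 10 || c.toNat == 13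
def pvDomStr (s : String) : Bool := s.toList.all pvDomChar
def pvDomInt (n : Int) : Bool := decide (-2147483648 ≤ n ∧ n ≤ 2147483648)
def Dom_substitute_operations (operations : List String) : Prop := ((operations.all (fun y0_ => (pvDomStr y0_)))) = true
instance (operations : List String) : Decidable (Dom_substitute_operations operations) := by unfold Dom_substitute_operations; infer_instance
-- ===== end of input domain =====

-- B replaces A's index-driven while loop with in-place splicing by a single stack-based
-- fold (look-behind merge); Python A mutates its argument in place and B reproduces that
-- mutation, but the equivalence proved here is about the RETURN value only.


-- ===== PORT A =====
-- termination facts for A's loop, cited by name in decreasing_by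
lemma subLoopA_dec_merge (ops : List String) (m : String) (i : Nat) (h : i + 1 < ops.length) :
    2 * (ops.take i ++ [m] ++ ops.drop (i+2)).length - i < 2 * ops.length - i := by
  simp only [List.length_append, List.length_take, List.length_drop, List.length_cons,
    List.length_nil]; omega

lemma subLoopA_dec_step (len i : Nat) (h : i + 1 < len) : 2 * len - (i+1) < 2 * len - i := by
  omega

-- A's while loop: index i over a list that is spliced in place; each iteration either
-- merges ops[i],ops[i+1] into one "substitute" string (keeping i) or advances i.
def subLoopA (ops : List String) (i : Nat) : List String :=
  if _h : i + 1 < ops.length then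
    let a := ops.getD i ""
    let b := ops.getD (i+1) ""
    if PySem.Str.startswith a "delete " && PySem.Str.startswith b "insert " then
      subLoopA (ops.take i ++
        ["substitute " ++ PySem.Str.slice a (some 7) none ++ " by " ++ PySem.Str.slice b (some 7) none]
        ++ ops.drop (i+2)) i
    else if PySem.Str.startswith a "insert " && PySem.Str.startswith b "delete " then
      subLoopA (ops.take i ++
        ["substitute " ++ PySem.Str.slice b (some 7) none ++ " by " ++ PySem.Str.slice a (some 7) none]
        ++ ops.drop (i+2)) i
    else subLoopA ops (i+1)
  else ops
termination_by 2 * ops.length - i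
decreasing_by
  · exact subLoopA_dec_merge ops _ i _h
  · exact subLoopA_dec_merge ops _ i _h
  · exact subLoopA_dec_step ops.length i _h

def substitute_operations (operations : List String) : List String :=
  subLoopA operations 0

-- ===== PORT B =====
-- B's loop body: `acc` is Python's `result` held last-element-first (a stack), so
-- `result[-1]` is `acc`'s head; `.reverse` at the end restores Python's order.
def altStep (acc : List String) (op : String) : List String :=
  match acc with
  | prev :: rest =>
    if PySem.Str.startswith prev "delete " && PySem.Str.startswith op "insert " then
      ("substitute " ++ PySem.Str.slice prev (some 7) none ++ " by " ++ PySem.Str.slice op (some 7) none) :: rest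
    else if PySem.Str.startswith prev "insert " && PySem.Str.startswith op "delete " then
      ("substitute " ++ PySem.Str.slice op (some 7) none ++ " by " ++ PySem.Str.slice prev (some 7) none) :: rest
    else op :: acc
  | [] => [op]

def substitute_operations_alt (operations : List String) : List String :=
  (operations.foldl altStep []).reverse

-- ===== PRECONDITION & SPEC =====
def Spec_substitute_operations (operations : List String) (out : List String) : Prop := out = substitute_operations_alt operations
instance (operations : List String) (out : List String) : Decidable (Spec_substitute_operations operations out) := by unfold Spec_substitute_operations; infer_instance

-- ===== CLAIM (what is proved, stated in full; the proofs are below) =====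
def Claim_equal_substitute_operations : Prop := ∀ (operations : List String), Dom_substitute_operations operations → Spec_substitute_operations operations (substitute_operations operations)

-- ===== LEMMAS AND PROOFS =====

-- B's step always pushes a merged "substitute … by …" string: such a string never
-- starts with "insert " or "delete ", so neither merge test can fire on it.
lemma altStep_subst (acc : List String) (x y : String) :
    altStep acc ("substitute " ++ x ++ " by " ++ y) = ("substitute " ++ x ++ " by " ++ y) :: acc := by
  cases acc with
  | nil => rfl
  | cons p r =>
    simp [altStep, PySem.Str.startswith_eq, PySem.Chars.startswith, List.isPrefixOf]

lemma drop_eq_getD_cons (l : List String) (i : Nat) (h : i < l.length) :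
    l.drop i = l.getD i "" :: l.drop (i+1) := by
  rw [List.getD_eq_getElem l "" h, List.drop_eq_getElem_cons h]

lemma getD_append_len (l₁ l₂ : List String) (m : String) :
    (l₁ ++ m :: l₂).getD l₁.length "" = m := by
  simp [List.getD]

-- one merge step of A corresponds to two steps of B's fold collapsing to one push
lemma foldl_merge (pre tail : List String) (a b m : String)
    (hstep1 : altStep pre.reverse a = a :: pre.reverse)
    (hstep2 : altStep (a :: pre.reverse) b = m :: pre.reverse)
    (hpush : altStep pre.reverse m = m :: pre.reverse) :
    List.foldl altStep pre.reverse (m :: tail) = List.foldl altStep pre.reverse (a :: b :: tail) := by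
  simp only [List.foldl_cons, hstep1, hstep2, hpush]

-- Main invariant: if the scanned prefix `ops.take i` is exactly what B's fold has kept
-- (reversed) and B's next step on ops[i] would push, A's remaining loop yields B's answer.
lemma subLoopA_eq (n : Nat) : ∀ (ops : List String) (i : Nat),
    2 * ops.length - i ≤ n → i ≤ ops.length →
    (i < ops.length → altStep ((ops.take i).reverse) (ops.getD i "") = ops.getD i "" :: (ops.take i).reverse) →
    List.foldl altStep [] (ops.take i) = (ops.take i).reverse →
    subLoopA ops i = (List.foldl altStep [] ops).reverse := by
  induction n with
  | zero =>
    intro ops i hm hi _ _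
    have hlen : ops.length = 0 := by omega
    have hi0 : i = 0 := by omega
    have hnil : ops = [] := List.eq_nil_of_length_eq_zero hlen
    subst hnil; subst hi0
    rw [subLoopA]; rfl
  | succ n ih =>
    intro ops i hm hi hinv hacc
    rw [subLoopA]
    by_cases h : i + 1 < ops.length
    · have hi1 : i < ops.length := by omega
      set a := ops.getD i "" with ha
      set b := ops.getD (i+1) "" with hb
      have hdrop : ops.drop i = a :: b :: ops.drop (i+2) := by
        rw [drop_eq_getD_cons ops i hi1, drop_eq_getD_cons ops (i+1) h]
      have hsplit : ops = ops.take i ++ (a :: b :: ops.drop (i+2)) := by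
        rw [← hdrop, List.take_append_drop]
      have htklen : (ops.take i).length = i := by simp; omega
      by_cases c1 : (PySem.Str.startswith a "delete " && PySem.Str.startswith b "insert ") = true
      · simp only [h, dif_pos, c1, if_pos]
        have hpush : ∀ acc, altStep acc ("substitute " ++ PySem.Str.slice a (some 7) none ++ " by " ++ PySem.Str.slice b (some 7) none) = ("substitute " ++ PySem.Str.slice a (some 7) none ++ " by " ++ PySem.Str.slice b (some 7) none) :: acc :=
          fun acc => altStep_subst acc _ _
        set m := "substitute " ++ PySem.Str.slice a (some 7) none ++ " by " ++ PySem.Str.slice b (some 7) none with hmdef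
        have hops'alt : ops.take i ++ [m] ++ ops.drop (i+2) = ops.take i ++ (m :: ops.drop (i+2)) := by simp
        have htake' : (ops.take i ++ [m] ++ ops.drop (i+2)).take i = ops.take i := by
          rw [hops'alt, List.take_append_of_le_length (by rw [htklen]), List.take_take]
          simp
        have hgetD' : (ops.take i ++ [m] ++ ops.drop (i+2)).getD i "" = m := by
          rw [hops'alt]
          have := getD_append_len (ops.take i) (ops.drop (i+2)) m
          rwa [htklen] at this
        have hstep2 : altStep (a :: (ops.take i).reverse) b = m :: (ops.take i).reverse := by
          simp only [altStep]
          rw [if_pos c1]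
        have key : List.foldl altStep [] (ops.take i ++ [m] ++ ops.drop (i+2)) = List.foldl altStep [] ops := by
          conv_rhs => rw [hsplit]
          rw [hops'alt, List.foldl_append, List.foldl_append, hacc]
          exact foldl_merge (ops.take i) (ops.drop (i+2)) a b m (hinv hi1) hstep2 (hpush _)
        rw [ih (ops.take i ++ [m] ++ ops.drop (i+2)) i
          (by simp only [List.length_append, List.length_cons, List.length_nil, htklen, List.length_drop]; omega)
          (by simp only [List.length_append, List.length_cons, List.length_nil, htklen, List.length_drop]; omega)
          (fun h' => by rw [htake', hgetD']; exact hpush _)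
          (by rw [htake']; exact hacc), key]
      · by_cases c2 : (PySem.Str.startswith a "insert " && PySem.Str.startswith b "delete ") = true
        · simp only [h, dif_pos, c1, c2, if_neg, if_pos, Bool.not_eq_true]
          have hpush : ∀ acc, altStep acc ("substitute " ++ PySem.Str.slice b (some 7) none ++ " by " ++ PySem.Str.slice a (some 7) none) = ("substitute " ++ PySem.Str.slice b (some 7) none ++ " by " ++ PySem.Str.slice a (some 7) none) :: acc :=
            fun acc => altStep_subst acc _ _
          set m := "substitute " ++ PySem.Str.slice b (some 7) none ++ " by " ++ PySem.Str.slice a (some 7) none with hmdef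
          have hops'alt : ops.take i ++ [m] ++ ops.drop (i+2) = ops.take i ++ (m :: ops.drop (i+2)) := by simp
          have htake' : (ops.take i ++ [m] ++ ops.drop (i+2)).take i = ops.take i := by
            rw [hops'alt, List.take_append_of_le_length (by rw [htklen]), List.take_take]
            simp
          have hgetD' : (ops.take i ++ [m] ++ ops.drop (i+2)).getD i "" = m := by
            rw [hops'alt]
            have := getD_append_len (ops.take i) (ops.drop (i+2)) m
            rwa [htklen] at this
          have hstep2 : altStep (a :: (ops.take i).reverse) b = m :: (ops.take i).reverse := by
            simp only [altStep]
            rw [if_neg (by exact fun hc => c1 hc), if_pos c2]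
          have key : List.foldl altStep [] (ops.take i ++ [m] ++ ops.drop (i+2)) = List.foldl altStep [] ops := by
            conv_rhs => rw [hsplit]
            rw [hops'alt, List.foldl_append, List.foldl_append, hacc]
            exact foldl_merge (ops.take i) (ops.drop (i+2)) a b m (hinv hi1) hstep2 (hpush _)
          rw [ih (ops.take i ++ [m] ++ ops.drop (i+2)) i
            (by simp only [List.length_append, List.length_cons, List.length_nil, htklen, List.length_drop]; omega)
            (by simp only [List.length_append, List.length_cons, List.length_nil, htklen, List.length_drop]; omega)
            (fun h' => by rw [htake', hgetD']; exact hpush _)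
            (by rw [htake']; exact hacc), key]
        · simp only [h, dif_pos, c1, c2, if_neg, Bool.not_eq_true]
          have htake1 : ops.take (i+1) = ops.take i ++ [a] := by
            rw [List.take_add_one, List.getElem?_eq_getElem hi1]
            rw [ha, List.getD_eq_getElem ops "" hi1]
            rfl
          have hpushnext : altStep ((ops.take (i+1)).reverse) (ops.getD (i+1) "") = ops.getD (i+1) "" :: (ops.take (i+1)).reverse := by
            rw [htake1, List.reverse_append]
            show altStep (a :: (ops.take i).reverse) b = b :: (a :: (ops.take i).reverse)
            simp only [altStep]
            rw [if_neg (by exact fun hc => c1 hc), if_neg (by exact fun hc => c2 hc)]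
          apply ih ops (i+1) (by omega) (by omega) (fun _ => hpushnext)
          rw [htake1, List.foldl_append, hacc]
          simp only [List.foldl_cons, List.foldl_nil]
          rw [hinv hi1, List.reverse_append]
          rfl
    · rw [dif_neg h]
      by_cases hil : i < ops.length
      · -- exactly one element remains: B pushes it, both results are ops itself
        have hdrop1 : ops.drop i = [ops.getD i ""] := by
          rw [drop_eq_getD_cons ops i hil, List.drop_eq_nil_of_le (by omega)]
        conv_rhs => rw [← List.take_append_drop i ops, hdrop1, List.foldl_append, hacc]
        simp only [List.foldl_cons, List.foldl_nil]
        rw [hinv hil]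
        conv_lhs => rw [← List.take_append_drop i ops, hdrop1]
        simp
      · have hieq : i = ops.length := by omega
        subst hieq
        rw [List.take_length] at hacc
        rw [hacc, List.reverse_reverse]

-- ===== VERDICT (by name: the statement is the Claim_ definition above) =====
theorem substitute_operations_spec : Claim_equal_substitute_operations := by
  intro operations _
  unfold Spec_substitute_operations substitute_operations substitute_operations_alt
  exact subLoopA_eq (2 * operations.length) operations 0 (by omega) (by omega)
    (fun _ => by cases operations <;> rfl) (by simp)
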